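-- pv_equiv track=rewrite | github.com/Arsen1302/Code-copy-detector | TestData/solutions/problem_729_4.py | solution_729_4
-- ===== SOURCE A (Python) =====
-- from typing import List
--
-- def solution_729_4(customers: List[int], grumpy: List[int], minutes: int) -> int:
--     #sliding window technique!
--     #first, linearly traverse customers array and see number of customers that are
--     #gauranteed to be satisfied regardless of store owner's powerup!
--
--     #then, use sliding window and maximize the number of customers that can be converted
--     #to satisfied by using minutes amount of power up !
--
--     #If we let len(customers)=n and len(grumpy) = m,
--     #Time: O(2n) -> O(n)
--     #Space: O(1)
--
--
--     #add these 2 results and that is the answer!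
--     #Step 1
--     ans = 0
--     for a in range(len(customers)):
--         if(grumpy[a] == 0):
--             ans += customers[a]
--     #step 2: sliding window!
--
--     L, R = 0, 0
--     converted = 0
--     maximum = 0
--     length = 0
--     while R < len(customers):
--         #process right element
--         if(grumpy[R] == 1):
--             converted += customers[R]
--         length += 1
--         #stopping condition: if length ever reaches minutes
--         while length == minutes:
--             #process current sliding window!
--             maximum = max(maximum, converted)
--             #shrink the sliding window!
--             #check if left minute is the minutes store owner is grumpy!
--             if(grumpy[L] == 1):
--                 converted -= customers[L]
--             length -= 1
--             L += 1
--         #keep expanding sliding window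
--         R += 1
--     return maximum + ans
-- ===== SOURCE B (Python) =====
-- from typing import List
--
-- def solution_729_4(customers: List[int], grumpy: List[int], minutes: int) -> int:
--     # prefix-sum reformulation: base satisfaction + best window gain via a prefix table
--     n = len(customers)
--     base = sum(c for c, g in zip(customers, grumpy) if g == 0)
--     P = [0]
--     s = 0
--     for c, g in zip(customers, grumpy):
--         if g == 1:
--             s += c
--         P.append(s)
--     gain = 0
--     if minutes >= 1:
--         for i in range(n - minutes + 1):
--             gain = max(gain, P[i + minutes] - P[i])
--     return base + gain
-- ===== Notes on version B (the rewrite author's own statement) =====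
-- stated objective: alternative
-- what changed: Replaces the maintained two-pointer sliding-window sum with a precomputed prefix-sum table queried by index, and the index-based base-sum loop with a single zip pass.
import Mathlib
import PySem

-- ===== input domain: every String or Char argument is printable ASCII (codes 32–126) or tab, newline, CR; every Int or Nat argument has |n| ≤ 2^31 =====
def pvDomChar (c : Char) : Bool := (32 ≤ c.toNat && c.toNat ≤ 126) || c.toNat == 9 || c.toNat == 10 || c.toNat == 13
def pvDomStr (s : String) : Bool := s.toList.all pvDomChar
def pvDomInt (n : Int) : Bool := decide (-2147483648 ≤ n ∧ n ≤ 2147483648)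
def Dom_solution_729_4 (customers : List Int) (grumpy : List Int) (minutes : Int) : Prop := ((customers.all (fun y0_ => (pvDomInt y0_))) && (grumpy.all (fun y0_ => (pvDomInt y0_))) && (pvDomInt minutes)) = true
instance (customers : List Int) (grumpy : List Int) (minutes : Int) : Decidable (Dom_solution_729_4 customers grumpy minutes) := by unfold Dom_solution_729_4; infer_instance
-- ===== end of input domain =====

-- B replaces A's maintained sliding-window sum with a prefix-sum table queried by index (alternative decomposition, same O(n)).

-- ===== PORT A =====
-- inner `while length == minutes:` loop; state (maximum, converted, length, L).
-- `0 < length` is a totality guard only: Python reaches this check with length ≥ 1 (length was just incremented).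
def pvAInner (customers grumpy : List Int) (minutes maximum converted length L : Int) :
    Int × Int × Int × Int :=
  if h : 0 < length ∧ length = minutes then
    let maximum := max maximum converted
    let converted := if PySem.List.pyGetD grumpy L 0 = 1 then converted - PySem.List.pyGetD customers L 0 else converted
    pvAInner customers grumpy minutes maximum converted (length - 1) (L + 1)
  else (maximum, converted, length, L)
termination_by length.toNat
decreasing_by omega

-- outer `while R < len(customers):` loop; fuel = number of remaining iterations (= len(customers) - R).
def pvALoop (customers grumpy : List Int) (minutes : Int) (fuel : Nat)
    (L R converted maximum length : Int) : Int :=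
  match fuel with
  | 0 => maximum
  | Nat.succ f =>
    let converted := if PySem.List.pyGetD grumpy R 0 = 1 then converted + PySem.List.pyGetD customers R 0 else converted
    let length := length + 1
    let st := pvAInner customers grumpy minutes maximum converted length L
    pvALoop customers grumpy minutes f st.2.2.2 (R + 1) st.2.1 st.1 st.2.2.1

def solution_729_4 (customers : List Int) (grumpy : List Int) (minutes : Int) : Int :=
  -- step 1 (indexing totalized with default 0; exact under Pre_, which puts every index in range)
  let ans := (PySem.List.pyRange 0 (customers.length : Int)).foldl
    (fun ans a => if PySem.List.pyGetD grumpy a 0 = 0 then ans + PySem.List.pyGetD customers a 0 else ans) 0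
  -- step 2: sliding window
  let maximum := pvALoop customers grumpy minutes customers.length 0 0 0 0 0
  maximum + ans

-- ===== PORT B =====
def solution_729_4_alt (customers : List Int) (grumpy : List Int) (minutes : Int) : Int :=
  let n : Int := customers.length
  let base := (customers.zip grumpy).foldl (fun s p => if p.2 = 0 then s + p.1 else s) 0
  let Ps := (customers.zip grumpy).foldl
    (fun (acc : List Int × Int) p =>
      let s := if p.2 = 1 then acc.2 + p.1 else acc.2
      (acc.1 ++ [s], s)) ([0], 0)
  let P := Ps.1
  let gain := if 1 ≤ minutes then
      (PySem.List.pyRange 0 (n - minutes + 1)).foldl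
        (fun g i => max g (PySem.List.pyGetD P (i + minutes) 0 - PySem.List.pyGetD P i 0)) 0
    else 0
  base + gain

-- ===== PRECONDITION & SPEC =====
-- Pre_ excludes exactly the inputs where A raises IndexError: grumpy shorter than customers.
def Pre_solution_729_4 (customers : List Int) (grumpy : List Int) (minutes : Int) : Prop :=
  customers.length ≤ grumpy.length
instance (customers : List Int) (grumpy : List Int) (minutes : Int) : Decidable (Pre_solution_729_4 customers grumpy minutes) := by unfold Pre_solution_729_4; infer_instance
def pvWitness_solution_729_4 : List Int × List Int × Int := ([1, 2, 3], [0, 1, 0], 2)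

def Spec_solution_729_4 (customers : List Int) (grumpy : List Int) (minutes : Int) (out : Int) : Prop := out = solution_729_4_alt customers grumpy minutes
instance (customers : List Int) (grumpy : List Int) (minutes : Int) (out : Int) : Decidable (Spec_solution_729_4 customers grumpy minutes out) := by unfold Spec_solution_729_4; infer_instance

-- ===== CLAIM (what is proved, stated in full; the proofs are below) =====
def Claim_equal_solution_729_4 : Prop := ∀ (customers : List Int) (grumpy : List Int) (minutes : Int), Dom_solution_729_4 customers grumpy minutes → Pre_solution_729_4 customers grumpy minutes → Spec_solution_729_4 customers grumpy minutes (solution_729_4 customers grumpy minutes)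

-- ===== LEMMAS AND PROOFS =====

-- the per-index "grumpy customer" value A reads, and its prefix sums
def pvGVal (c g : List Int) (i : Int) : Int :=
  if PySem.List.pyGetD g i 0 = 1 then PySem.List.pyGetD c i 0 else 0

def pvGs (c g : List Int) : List Int := (c.zip g).map (fun p => if p.2 = 1 then p.1 else 0)

def pvS (c g : List Int) (k : Int) : Int := ((pvGs c g).take k.toNat).sum

def pvL (m R : Int) : Int := if 1 ≤ m then max 0 (R - m + 1) else 0

def pvM (c g : List Int) (m R : Int) : Int :=
  (PySem.List.pyRange 0 (R - m + 1)).foldl (fun acc i => max acc (pvS c g (i + m) - pvS c g i)) 0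

lemma pvGs_length (c g : List Int) (h : c.length ≤ g.length) : (pvGs c g).length = c.length := by
  simp [pvGs, List.length_zip]; omega

lemma pvGs_getElem (c g : List Int) (h : c.length ≤ g.length) (k : Nat) (hk : k < c.length)
    (hk' : k < (pvGs c g).length) : (pvGs c g)[k] = pvGVal c g (k : Int) := by
  have hkg : k < g.length := by omega
  simp [pvGs, pvGVal, List.getElem_zip,
    PySem.List.pyGetD_of_nonneg (i := (k : Int)) g 0 (Int.natCast_nonneg k),
    PySem.List.pyGetD_of_nonneg (i := (k : Int)) c 0 (Int.natCast_nonneg k),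
    List.getD_eq_getElem?_getD, hk, hkg]

lemma pvS_succ (c g : List Int) (h : c.length ≤ g.length) (k : Int) (h0 : 0 ≤ k)
    (hk : k < c.length) : pvS c g (k + 1) = pvS c g k + pvGVal c g k := by
  have hlen : k.toNat < (pvGs c g).length := by rw [pvGs_length c g h]; omega
  have h1 : (k + 1).toNat = k.toNat + 1 := by omega
  rw [pvS, pvS, h1, List.take_add_one, List.sum_append]
  have : (pvGs c g)[k.toNat]? = some ((pvGs c g)[k.toNat]) := List.getElem?_eq_getElem hlen
  rw [this]
  have := pvGs_getElem c g h k.toNat (by omega) hlen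
  simp [this, Int.toNat_of_nonneg h0]

-- the inner while loop runs at most once: one unfolding
lemma pvAInner_eq (c g : List Int) (m maximum conv len L : Int) :
    pvAInner c g m maximum conv len L =
      if 0 < len ∧ len = m then
        (max maximum conv,
         (if PySem.List.pyGetD g L 0 = 1 then conv - PySem.List.pyGetD c L 0 else conv),
         len - 1, L + 1)
      else (maximum, conv, len, L) := by
  rw [pvAInner]
  by_cases h : 0 < len ∧ len = m
  · rw [dif_pos h, if_pos h]
    rw [pvAInner, dif_neg (by omega)]
  · rw [dif_neg h, if_neg h]

lemma pvALoop_inv (c g : List Int) (m : Int) (h : c.length ≤ g.length) :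
    ∀ (fuel : Nat) (R : Int), 0 ≤ R → R + fuel = c.length →
      pvALoop c g m fuel (pvL m R) R (pvS c g R - pvS c g (pvL m R))
        (if 1 ≤ m then pvM c g m R else 0) (R - pvL m R)
      = (if 1 ≤ m then pvM c g m (c.length : Int) else 0) := by
  intro fuel
  induction fuel with
  | zero =>
    intro R hR0 hR
    have : R = (c.length : Int) := by omega
    subst this
    simp [pvALoop]
  | succ f ih =>
    intro R hR0 hR
    have hRlt : R < (c.length : Int) := by omega
    simp only [pvALoop]
    have hconv : (if PySem.List.pyGetD g R 0 = 1 then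
          (pvS c g R - pvS c g (pvL m R)) + PySem.List.pyGetD c R 0
        else (pvS c g R - pvS c g (pvL m R)))
        = pvS c g (R + 1) - pvS c g (pvL m R) := by
      rw [pvS_succ c g h R hR0 (by exact_mod_cast hRlt)]
      unfold pvGVal
      split_ifs <;> ring
    rw [hconv]
    by_cases hm : 1 ≤ m
    · by_cases hRm : m ≤ R + 1
      · -- window full: inner loop fires once
        have hL : pvL m R = R - m + 1 := by simp only [pvL, if_pos hm]; omega
        rw [pvAInner_eq,
          if_pos (show 0 < R - pvL m R + 1 ∧ R - pvL m R + 1 = m from ⟨by omega, by omega⟩)]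
        have hL0 : 0 ≤ pvL m R := by omega
        have hconv2 : (if PySem.List.pyGetD g (pvL m R) 0 = 1 then
              pvS c g (R + 1) - pvS c g (pvL m R) - PySem.List.pyGetD c (pvL m R) 0
            else pvS c g (R + 1) - pvS c g (pvL m R))
            = pvS c g (R + 1) - pvS c g (pvL m R + 1) := by
          rw [pvS_succ c g h (pvL m R) hL0 (by omega)]
          unfold pvGVal
          split_ifs <;> ring
        have hmax : max (if 1 ≤ m then pvM c g m R else 0)
            (pvS c g (R + 1) - pvS c g (pvL m R)) = pvM c g m (R + 1) := by
          rw [if_pos hm, hL, pvM, pvM, show R + 1 - m + 1 = (R - m + 1) + 1 by ring,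
            PySem.List.pyRange_one_succ_right (a := 0) (b := R - m + 1) (by omega),
            List.foldl_append]
          simp only [List.foldl_cons, List.foldl_nil]
          rw [show R - m + 1 + m = R + 1 by ring]
        simp only [hconv2, hmax]
        have hih := ih (R + 1) (by omega) (by push_cast at hR ⊢; omega)
        rw [show pvL m (R + 1) = pvL m R + 1 by simp only [pvL, if_pos hm]; omega,
          if_pos hm] at hih
        rw [show (R - pvL m R + 1 - 1 : Int) = R + 1 - (pvL m R + 1) by ring]
        exact hih
      · -- window not yet full: inner loop does not fire
        have hL : pvL m R = 0 := by simp only [pvL, if_pos hm]; omega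
        rw [pvAInner_eq, if_neg (by omega)]
        have hMR : pvM c g m R = 0 := by
          rw [pvM, PySem.List.pyRange_one_eq_nil (by omega)]; rfl
        have hMR1 : pvM c g m (R + 1) = 0 := by
          rw [pvM, PySem.List.pyRange_one_eq_nil (by omega)]; rfl
        have hih := ih (R + 1) (by omega) (by push_cast at hR ⊢; omega)
        rw [show pvL m (R + 1) = 0 by simp only [pvL, if_pos hm]; omega] at hih
        simp only [if_pos hm, hMR1] at hih
        simp only [hL, if_pos hm, hMR]
        rw [show (R - 0 + 1 : Int) = R + 1 - 0 by ring]
        exact hih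
    · -- minutes < 1: the inner loop never fires
      have hL : pvL m R = 0 := by simp only [pvL, if_neg hm]
      rw [pvAInner_eq, if_neg (by omega)]
      have hih := ih (R + 1) (by omega) (by push_cast at hR ⊢; omega)
      rw [show pvL m (R + 1) = 0 by simp only [pvL, if_neg hm]] at hih
      simp only [if_neg hm] at hih
      simp only [hL, if_neg hm]
      rw [show (R - 0 + 1 : Int) = R + 1 - 0 by ring]
      exact hih

-- a mapped-over-indices form equals the zip form (both read c[k], g[k])
lemma pvMapRangeZip (c g : List Int) (h : c.length ≤ g.length) :
    (List.range c.length).map (fun k : Nat =>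
        if PySem.List.pyGetD g (k : Int) 0 = 0 then PySem.List.pyGetD c (k : Int) 0 else 0)
    = (c.zip g).map (fun p => if p.2 = 0 then p.1 else 0) := by
  apply List.ext_getElem
  · simp [List.length_zip]; omega
  · intro k h1 h2
    have hk : k < c.length := by simpa using h1
    have hkg : k < g.length := by omega
    simp only [List.getElem_map, List.getElem_range, List.getElem_zip]
    rw [PySem.List.pyGetD_of_nonneg c 0 (Int.natCast_nonneg k),
      PySem.List.pyGetD_of_nonneg g 0 (Int.natCast_nonneg k)]
    simp [List.getD_eq_getElem?_getD, hk, hkg]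

lemma pvFoldP (zs : List (Int × Int)) :
    ∀ (acc : List Int) (s : Int),
    (zs.foldl (fun (a : List Int × Int) p =>
        let s := if p.2 = 1 then a.2 + p.1 else a.2
        (a.1 ++ [s], s)) (acc, s)).1
    = acc ++ (List.range zs.length).map
        (fun k => s + ((zs.map (fun p => if p.2 = 1 then p.1 else 0)).take (k + 1)).sum) := by
  induction zs with
  | nil => intro acc s; simp
  | cons p t ih =>
    intro acc s
    simp only [List.foldl_cons]
    rw [ih]
    have hs : (if p.2 = 1 then s + p.1 else s) = s + (if p.2 = 1 then p.1 else 0) := by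
      split_ifs <;> ring
    simp only [List.length_cons, List.range_succ_eq_map, List.map_cons, List.map_map,
      List.take_succ_cons, List.sum_cons, List.append_assoc, List.cons_append, List.nil_append]
    rw [hs]
    congr 2
    · simp
    · apply List.map_congr_left
      intro k _
      simp only [Function.comp]
      ring

lemma pvP_eq (c g : List Int) :
    ((c.zip g).foldl (fun (acc : List Int × Int) p =>
        let s := if p.2 = 1 then acc.2 + p.1 else acc.2
        (acc.1 ++ [s], s)) ([0], 0)).1
    = (List.range ((c.zip g).length + 1)).map (fun k : Nat => pvS c g (k : Int)) := by
  rw [pvFoldP]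
  simp only [List.range_succ_eq_map, List.map_cons, List.map_map, List.singleton_append]
  refine List.cons_eq_cons.mpr ⟨by simp [pvS], ?_⟩
  apply List.map_congr_left
  intro k _
  simp [Function.comp, pvS, pvGs]

lemma pvAns_eq_base (c g : List Int) (h : c.length ≤ g.length) :
    (PySem.List.pyRange 0 (c.length : Int)).foldl
      (fun ans a => if PySem.List.pyGetD g a 0 = 0 then ans + PySem.List.pyGetD c a 0 else ans) 0
    = (c.zip g).foldl (fun s p => if p.2 = 0 then s + p.1 else s) 0 := by
  rw [PySem.List.pyRange_zero_natCast, List.foldl_map]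
  have h1 : ∀ (acc : Int), ∀ k ∈ List.range c.length,
      (if PySem.List.pyGetD g (k : Int) 0 = 0 then acc + PySem.List.pyGetD c (k : Int) 0 else acc)
      = acc + (if PySem.List.pyGetD g (k : Int) 0 = 0 then PySem.List.pyGetD c (k : Int) 0 else 0) := by
    intro acc k _; split_ifs <;> ring
  have h2 : ∀ (acc : Int), ∀ p ∈ c.zip g,
      (if p.2 = 0 then acc + p.1 else acc) = acc + (if p.2 = 0 then p.1 else 0) := by
    intro acc p _; split_ifs <;> ring
  rw [PySem.List.foldl_congr_mem _ _ _ _ h1, PySem.List.foldl_congr_mem _ _ _ _ h2,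
    PySem.List.foldl_add, PySem.List.foldl_add, pvMapRangeZip c g h]

-- ===== VERDICT (by name: the statement is the Claim_ definition above) =====
theorem solution_729_4_spec : Claim_equal_solution_729_4 := by
  intro c g m _ hpre
  unfold Pre_solution_729_4 at hpre
  unfold Spec_solution_729_4 solution_729_4 solution_729_4_alt
  simp only []
  -- the base sums agree
  rw [pvAns_eq_base c g hpre]
  -- A's sliding window equals the window maximum pvM
  have hL0 : pvL m 0 = 0 := by
    simp only [pvL]; split_ifs <;> omega
  have hM0 : (if 1 ≤ m then pvM c g m 0 else 0) = 0 := by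
    split_ifs with hm
    · rw [pvM, PySem.List.pyRange_one_eq_nil (by omega)]; rfl
    · rfl
  have hA := pvALoop_inv c g m hpre c.length 0 le_rfl (by simp)
  rw [hL0] at hA
  simp only [sub_self] at hA
  rw [hM0] at hA
  rw [hA]
  -- B's gain equals the same window maximum
  have hzlen : (c.zip g).length = c.length := by simp [List.length_zip]; omega
  have hgain : (if 1 ≤ m then
      (PySem.List.pyRange 0 ((c.length : Int) - m + 1)).foldl
        (fun gn i => max gn
          (PySem.List.pyGetD (((c.zip g).foldl (fun (acc : List Int × Int) p =>
              let s := if p.2 = 1 then acc.2 + p.1 else acc.2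
              (acc.1 ++ [s], s)) ([0], 0)).1) (i + m) 0
           - PySem.List.pyGetD (((c.zip g).foldl (fun (acc : List Int × Int) p =>
              let s := if p.2 = 1 then acc.2 + p.1 else acc.2
              (acc.1 ++ [s], s)) ([0], 0)).1) i 0)) 0
    else 0) = (if 1 ≤ m then pvM c g m (c.length : Int) else 0) := by
    split_ifs with hm
    · rw [pvM]
      apply PySem.List.foldl_congr_mem
      intro acc i hi
      rw [PySem.List.mem_pyRange_one] at hi
      have hP : ∀ (j : Int), 0 ≤ j → j ≤ (c.length : Int) →
          PySem.List.pyGetD (((c.zip g).foldl (fun (acc : List Int × Int) p =>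
              let s := if p.2 = 1 then acc.2 + p.1 else acc.2
              (acc.1 ++ [s], s)) ([0], 0)).1) j 0 = pvS c g j := by
        intro j hj0 hjn
        rw [pvP_eq, hzlen, PySem.List.pyGetD_of_nonneg _ _ hj0,
          PySem.List.getD_map_range _ _ _ _ (by omega),
          Int.toNat_of_nonneg hj0]
      rw [hP i (by omega) (by omega), hP (i + m) (by omega) (by omega)]
    · rfl
  rw [hgain]
  ring
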